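-- pv_equiv track=rewrite | github.com/l-dfa/py_naive_cryptology | source/numbers_ops.py | equiv_list
-- ===== SOURCE A (Python) =====
-- def equiv_list(m, a=0, max_q=5):
--     '''first 2*max_q+1 members of an equivalence class of remainders
--        of modulus m
--
--     params
--       - m            int - modulus
--       - a            int - 1st member; if a>m -> a=a%m
--       - max_q        int - number half-1 of members to calculate
--
--     return a list of 2*max_q+1 members
--
--     note. members are calculated as a-q*m and a+q*m
--     '''
--     a = a % m
--     result = []
--     for q in range(0, max_q + 1):
--         if q == 0:
--             result.append(a)
--         else:
--             result.insert(0, a - q * m)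
--             result.append(a + q * m)
--     return result
-- ===== SOURCE B (Python) =====
-- def equiv_list(m, a=0, max_q=5):
--     x = a % m - max_q * m
--     result = []
--     for _ in range(2 * max_q + 1):
--         result.append(x)
--         x += m
--     return result
-- ===== Notes on version B (the rewrite author's own statement) =====
-- stated objective: faster
-- what changed: Replaces the outward two-sided loop (insert(0) on the left, append on the right, q==0 special case, a multiplication per element) by a counted running-value loop: start at the smallest member a%m - max_q*m and append while adding m, 2*max_q+1 times.
import Mathlib
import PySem

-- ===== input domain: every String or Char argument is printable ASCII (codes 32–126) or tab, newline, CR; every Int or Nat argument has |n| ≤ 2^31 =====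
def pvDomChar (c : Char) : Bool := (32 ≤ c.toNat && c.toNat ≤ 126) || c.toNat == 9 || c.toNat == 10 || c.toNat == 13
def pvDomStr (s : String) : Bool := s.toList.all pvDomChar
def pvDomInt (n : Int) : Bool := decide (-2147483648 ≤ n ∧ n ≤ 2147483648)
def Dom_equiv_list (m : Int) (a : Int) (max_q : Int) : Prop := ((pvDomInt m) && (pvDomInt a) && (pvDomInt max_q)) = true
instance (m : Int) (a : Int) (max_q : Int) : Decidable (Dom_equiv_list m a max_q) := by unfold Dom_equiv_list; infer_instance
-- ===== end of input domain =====

-- B replaces A's outward two-sided construction (insert(0)/append with a q==0 case,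
-- a multiplication per element) by one counted running-value loop from the smallest
-- member upward; objective: faster (O(max_q) vs A's quadratic insert(0)).


-- ===== PORT A =====
-- a = a % m; for q in range(0, max_q+1): q==0 -> append a; else insert(0, a-q*m); append a+q*m
def equiv_list (m : Int) (a : Int) (max_q : Int) : List Int :=
  let a' := PySem.Int.mod a m
  (PySem.List.pyRange 0 (max_q + 1) 1).foldl
    (fun result q =>
      if q = 0 then result ++ [a']
      else (a' - q * m) :: (result ++ [a' + q * m])) []

-- ===== PORT B =====
-- x = a % m - max_q*m; then 2*max_q+1 times: append x; x += m  (state = (result, x))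
def equiv_list_alt (m : Int) (a : Int) (max_q : Int) : List Int :=
  ((PySem.List.pyRange 0 (2 * max_q + 1) 1).foldl
    (fun (st : List Int × Int) _ => (st.1 ++ [st.2], st.2 + m))
    ([], PySem.Int.mod a m - max_q * m)).1

-- ===== PRECONDITION & SPEC =====
-- Python raises ZeroDivisionError at 'a % m' when m = 0 (in both A and B).
def Pre_equiv_list (m : Int) (a : Int) (max_q : Int) : Prop := m ≠ 0
instance (m : Int) (a : Int) (max_q : Int) : Decidable (Pre_equiv_list m a max_q) := by unfold Pre_equiv_list; infer_instance
def pvWitness_equiv_list : Int × Int × Int := (3, 7, 2)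

def Spec_equiv_list (m : Int) (a : Int) (max_q : Int) (out : List Int) : Prop := out = equiv_list_alt m a max_q
instance (m : Int) (a : Int) (max_q : Int) (out : List Int) : Decidable (Spec_equiv_list m a max_q out) := by unfold Spec_equiv_list; infer_instance

-- ===== CLAIM (what is proved, stated in full; the proofs are below) =====
def Claim_equal_equiv_list : Prop := ∀ (m : Int) (a : Int) (max_q : Int), Dom_equiv_list m a max_q → Pre_equiv_list m a max_q → Spec_equiv_list m a max_q (equiv_list m a max_q)

-- ===== LEMMAS AND PROOFS =====

-- A's loop invariant: after processing q = 0..n, A's list is the map over -n..n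
theorem equiv_list_loopA (a' m : Int) (n : Nat) :
    (PySem.List.pyRange 0 ((n : Int) + 1) 1).foldl
      (fun result q =>
        if q = 0 then result ++ [a']
        else (a' - q * m) :: (result ++ [a' + q * m])) []
    = (PySem.List.pyRange (-(n : Int)) ((n : Int) + 1) 1).map (fun q => a' + q * m) := by
  induction n with
  | zero =>
      have h0 : PySem.List.pyRange (0 : Int) ((0:Int) + 1) 1 = [0] := PySem.List.pyRange_one_singleton 0
      simp at h0
      simp [h0]
  | succ k ih =>
      have h1 : (PySem.List.pyRange 0 ((k : Int) + 1 + 1) 1)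
          = PySem.List.pyRange 0 ((k : Int) + 1) 1 ++ [(k : Int) + 1] :=
        PySem.List.pyRange_one_succ_right (by positivity)
      have h2 : (PySem.List.pyRange (-((k : Int) + 1)) ((k : Int) + 1 + 1) 1)
          = (-((k : Int) + 1)) :: (PySem.List.pyRange (-(k : Int)) ((k : Int) + 1) 1 ++ [(k : Int) + 1]) := by
        rw [PySem.List.pyRange_one_cons (by omega)]
        have h3 : (PySem.List.pyRange (-((k : Int) + 1) + 1) ((k : Int) + 1 + 1) 1)
            = PySem.List.pyRange (-(k : Int)) ((k : Int) + 1) 1 ++ [(k : Int) + 1] := by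
          have he : -((k : Int) + 1) + 1 = -(k : Int) := by ring
          rw [he]
          exact PySem.List.pyRange_one_succ_right (by omega)
        rw [h3]
      push_cast at h1 h2 ⊢
      rw [h1, List.foldl_append, ih, h2]
      simp only [List.foldl_cons, List.foldl_nil, List.map_append, List.map]
      have hne : ((k : Int) + 1) ≠ 0 := by omega
      simp only [if_neg hne]
      congr 1
      ring

-- B's loop invariant: the counted running-value fold appends x, x+m, …, x+(n-1)m
theorem equiv_list_loopB (m : Int) (n : Nat) : ∀ (acc : List Int) (x : Int),
    (PySem.List.pyRange 0 (n : Int) 1).foldl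
      (fun (st : List Int × Int) _ => (st.1 ++ [st.2], st.2 + m)) (acc, x)
    = (acc ++ (List.range n).map (fun i : Nat => x + (i : Int) * m), x + (n : Int) * m) := by
  induction n with
  | zero =>
      intro acc x
      rw [PySem.List.pyRange_one_eq_nil (by omega)]
      simp
  | succ k ih =>
      intro acc x
      have h1 : (PySem.List.pyRange 0 ((k : Int) + 1) 1)
          = (0 : Int) :: PySem.List.pyRange 1 ((k : Int) + 1) 1 :=
        PySem.List.pyRange_one_cons (by omega)
      have h2 : PySem.List.pyRange 1 ((k : Int) + 1) 1
          = (PySem.List.pyRange 0 (k : Int) 1).map (fun j => 1 + j) := by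
        rw [PySem.List.pyRange_one, PySem.List.pyRange_one, List.map_map]
        have ht : ((k : Int) + 1 - 1).toNat = ((k : Int) - 0).toNat := by omega
        rw [ht]
        congr 1
        funext j
        simp [Function.comp]
      have hc : ((k + 1 : Nat) : Int) = (k : Int) + 1 := by push_cast; ring
      rw [hc, h1]
      simp only [List.foldl_cons]
      rw [h2, List.foldl_map, ih]
      simp only [Prod.mk.injEq]
      refine ⟨?_, by ring⟩
      rw [List.range_succ_eq_map, List.map_cons, List.map_map, List.append_assoc,
        List.singleton_append]
      congr 1
      congr 1
      · simp
      · apply List.map_congr_left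
        intro i _
        simp [Function.comp]
        ring

theorem equiv_list_nonpos (m a max_q : Int) (h : max_q < 0) :
    equiv_list m a max_q = equiv_list_alt m a max_q := by
  unfold equiv_list equiv_list_alt
  rw [PySem.List.pyRange_one_eq_nil (by omega), PySem.List.pyRange_one_eq_nil (by omega)]
  rfl

-- ===== VERDICT (by name: the statement is the Claim_ definition above) =====
theorem equiv_list_spec : Claim_equal_equiv_list := by
  intro m a max_q _ _
  unfold Spec_equiv_list
  by_cases h : max_q < 0
  · exact equiv_list_nonpos m a max_q h
  · obtain ⟨n, rfl⟩ : ∃ n : Nat, max_q = (n : Int) :=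
      ⟨max_q.toNat, (Int.toNat_of_nonneg (by omega)).symm⟩
    set a' := PySem.Int.mod a m with ha'
    unfold equiv_list equiv_list_alt
    rw [← ha']
    have hB := equiv_list_loopB m (2 * n + 1) [] (a' - (n : Int) * m)
    have hcast : ((2 * n + 1 : Nat) : Int) = 2 * (n : Int) + 1 := by push_cast; ring
    rw [hcast] at hB
    rw [hB]
    rw [equiv_list_loopA a' m n]
    simp only [List.nil_append]
    rw [PySem.List.pyRange_one]
    have hlen : (((n : Int) + 1) - (-(n : Int))).toNat = 2 * n + 1 := by omega
    rw [hlen, List.map_map]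
    symm
    apply List.map_congr_left
    intro i _
    simp [Function.comp]
    ring
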